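-- pv_equiv track=rewrite | github.com/syha6821/advent-of-code | 2018/11/1.py | largest_square
-- ===== SOURCE A (Python) =====
-- from collections import namedtuple
-- from itertools import accumulate
--
-- Pos = namedtuple("Pos",["row","col"])
--
-- def largest_square(cells):
--     L = 3
--     C = len(cells)
--     accs = [list(accumulate(line,initial=0)) for line in cells]
--     squares = [[0] * (C - L + 1) for _ in range(C - L + 1)]
--     for i in range(len(squares)):
--         squares[0][i] = (accs[0][i+3] - accs[0][i]) + (accs[1][i+3] - accs[1][i]) + (accs[2][i+3] - accs[2][i])
--
--     for row in range(1,len(squares)):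
--         for i in range(len(squares)):
--             squares[row][i] = squares[row-1][i] - (accs[row-1][i+3] - accs[row-1][i]) + (accs[row+2][i+3] - accs[row+2][i])
--
--     power = squares[0][0]
--     pos = Pos(0,0)
--
--     for row in range(len(squares)):
--         for col in range(len(squares)):
--             if squares[row][col] > power:
--                 power = squares[row][col]
--                 pos = Pos(row,col)
--
--     return pos
-- ===== SOURCE B (Python) =====
-- from collections import namedtuple
--
-- Pos = namedtuple("Pos", ["row", "col"])
--
-- def largest_square(cells):
--     L = 3
--     C = len(cells)
--     n = C - L + 1
--     # 2D summed-area table: P[r][c] = sum of cells[i][j] for i < r, j < c (j < C)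
--     P = [[0] * (C + 1) for _ in range(C + 1)]
--     for r in range(C):
--         for c in range(C):
--             P[r+1][c+1] = cells[r][c] + P[r][c+1] + P[r+1][c] - P[r][c]
--     squares = [[P[r+3][c+3] - P[r][c+3] - P[r+3][c] + P[r][c] for c in range(n)]
--                for r in range(n)]
--     power = squares[0][0]
--     pos = Pos(0, 0)
--     for row in range(len(squares)):
--         for col in range(len(squares)):
--             if squares[row][col] > power:
--                 power = squares[row][col]
--                 pos = Pos(row, col)
--     return pos
-- ===== Notes on version B (the rewrite author's own statement) =====
-- stated objective: alternative
-- what changed: Replaces A's per-row itertools.accumulate prefix sums plus a row-to-row sliding-window recurrence by a single 2D summed-area table from which every 3x3 sum is read off with four corner lookups.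
import Mathlib
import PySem

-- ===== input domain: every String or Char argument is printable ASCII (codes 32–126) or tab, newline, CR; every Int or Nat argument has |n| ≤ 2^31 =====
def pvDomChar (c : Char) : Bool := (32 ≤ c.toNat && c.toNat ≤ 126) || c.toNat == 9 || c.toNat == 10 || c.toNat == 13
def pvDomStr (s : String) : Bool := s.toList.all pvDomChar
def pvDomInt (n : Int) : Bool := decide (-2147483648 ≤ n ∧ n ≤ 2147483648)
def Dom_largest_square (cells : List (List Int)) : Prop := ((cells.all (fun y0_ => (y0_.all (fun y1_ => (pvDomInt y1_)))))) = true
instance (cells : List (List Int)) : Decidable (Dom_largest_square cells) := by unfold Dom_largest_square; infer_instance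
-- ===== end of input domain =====

-- B replaces A's per-row accumulate + sliding row recurrence by a 2D summed-area table
-- (same O(C^2) cost, a genuinely different table); return value only, proved equal on Pre_.

-- shared final scan: both Pythons end with the identical row-major strict-'>' arg-max loop
def pvScanMax (squares : List (List Int)) : Int × Int :=
  let st := (PySem.List.enumerate squares).foldl
    (fun (st : Int × Int × Int) rw =>
      (PySem.List.enumerate rw.2).foldl
        (fun st cl => if cl.2 > st.1 then (cl.2, rw.1, cl.1) else st) st)
    ((squares.getD 0 []).getD 0 0, 0, 0)
  (st.2.1, st.2.2)

-- ===== PORT A =====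
-- A: accs = prefix sums of each row (accumulate, initial=0); first squares row from accs,
-- later rows by the sliding recurrence squares[r][i] = squares[r-1][i] - strip(r-1) + strip(r+2).
-- Python indexing raises where it is out of range; Pre_ excludes those inputs, so .getD _ 0 is exact here.
def pvRowsA (accs : List (List Int)) (n : Nat) (prev : List Int) (r k : Nat) : List (List Int) :=
  match k with
  | 0 => []
  | k+1 =>
    let nr := (List.range n).map (fun i =>
      prev.getD i 0 - ((accs.getD (r-1) []).getD (i+3) 0 - (accs.getD (r-1) []).getD i 0)
        + ((accs.getD (r+2) []).getD (i+3) 0 - (accs.getD (r+2) []).getD i 0))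
    nr :: pvRowsA accs n nr (r+1) k

def largest_square (cells : List (List Int)) : Int × Int :=
  let C := cells.length
  let n := C - 3 + 1
  let accs := cells.map (fun line => line.scanl (· + ·) 0)
  let row0 := (List.range n).map (fun i =>
    ((accs.getD 0 []).getD (i+3) 0 - (accs.getD 0 []).getD i 0)
    + ((accs.getD 1 []).getD (i+3) 0 - (accs.getD 1 []).getD i 0)
    + ((accs.getD 2 []).getD (i+3) 0 - (accs.getD 2 []).getD i 0))
  pvScanMax (row0 :: pvRowsA accs n row0 1 (n - 1))

-- ===== PORT B =====
-- B: summed-area table P with P[r+1][c+1] = cells[r][c] + P[r][c+1] + P[r+1][c] - P[r][c];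
-- each 3x3 sum is four corner lookups. Same .getD _ 0 convention under Pre_ as port A.
def pvSatRowGo (prev : List Int) (row : List Int) (c : Nat) (cur : Int) : List Int :=
  match row with
  | [] => []
  | x :: xs =>
    let v := x + prev.getD (c+1) 0 + cur - prev.getD c 0
    v :: pvSatRowGo prev xs (c+1) v

def pvSatRow (prev row : List Int) : List Int := (0 : Int) :: pvSatRowGo prev row 0 0

def pvSatGo (cells : List (List Int)) (prev : List Int) (r C k : Nat) : List (List Int) :=
  match k with
  | 0 => []
  | k+1 =>
    let nr := pvSatRow prev ((cells.getD r []).take C)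
    nr :: pvSatGo cells nr (r+1) C k

def largest_square_alt (cells : List (List Int)) : Int × Int :=
  let C := cells.length
  let n := C - 3 + 1
  let P := List.replicate (C+1) (0 : Int) :: pvSatGo cells (List.replicate (C+1) (0 : Int)) 0 C C
  let squares := (List.range n).map (fun r => (List.range n).map (fun c =>
    (P.getD (r+3) []).getD (c+3) 0 - (P.getD r []).getD (c+3) 0
      - (P.getD (r+3) []).getD c 0 + (P.getD r []).getD c 0))
  pvScanMax squares

-- ===== PRECONDITION & SPEC =====
-- Pre_: exactly the inputs on which Python A returns: at least 3 rows and every row at least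
-- len(cells) long (otherwise both Pythons raise IndexError).
def Pre_largest_square (cells : List (List Int)) : Prop :=
  3 ≤ cells.length ∧ ∀ row ∈ cells, cells.length ≤ row.length
instance (cells : List (List Int)) : Decidable (Pre_largest_square cells) := by
  unfold Pre_largest_square; infer_instance

def pvWitness_largest_square : List (List Int) := [[1,2,3],[4,5,6],[7,8,9]]

def Spec_largest_square (cells : List (List Int)) (out : Int × Int) : Prop := out = largest_square_alt cells
instance (cells : List (List Int)) (out : Int × Int) : Decidable (Spec_largest_square cells out) := by unfold Spec_largest_square; infer_instance

-- ===== CLAIM (what is proved, stated in full; the proofs are below) =====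
def Claim_equal_largest_square : Prop := ∀ (cells : List (List Int)), Dom_largest_square cells → Pre_largest_square cells → Spec_largest_square cells (largest_square cells)

-- ===== LEMMAS AND PROOFS =====

-- the 3x3 block sum both tables compute, written with prefix sums of the (untruncated) rows
def pvRsum (cells : List (List Int)) (t c : Nat) : Int :=
  ((cells.getD t []).take (c+3)).sum - ((cells.getD t []).take c).sum

def pvBval (cells : List (List Int)) (r c : Nat) : Int :=
  pvRsum cells r c + pvRsum cells (r+1) c + pvRsum cells (r+2) c

-- B-side spec value: psum r c = sum of cells[t][j] for t < r, j < min c C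
def pvPsum (cells : List (List Int)) (r c : Nat) : Int :=
  match r with
  | 0 => 0
  | r+1 => pvPsum cells r c + (((cells.getD r []).take cells.length).take c).sum

theorem pvPsum_zero (cells : List (List Int)) (r : Nat) : pvPsum cells r 0 = 0 := by
  induction r with
  | zero => rfl
  | succ r ih => simp [pvPsum, ih]

theorem scanl_getD (l : List Int) (a : Int) (j : Nat) (h : j ≤ l.length) :
    (l.scanl (· + ·) a).getD j 0 = a + (l.take j).sum := by
  induction l generalizing a j with
  | nil =>
    simp only [List.length_nil, Nat.le_zero] at h
    subst h; simp
  | cons x xs ih =>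
    cases j with
    | zero => simp
    | succ j =>
      rw [List.scanl_cons, List.getD_cons_succ, List.take_succ_cons, List.sum_cons,
        ih (a + x) j (by simpa using h)]
      ring

theorem getD_map (cells : List (List Int)) (f : List Int → List Int) (r : Nat)
    (h : r < cells.length) : (cells.map f).getD r [] = f (cells.getD r []) := by
  simp [List.getD, h]

theorem getD_map_range' {α : Type} (f : Nat → α) (n i : Nat) (d : α) (h : i < n) :
    ((List.range n).map f).getD i d = f i := by
  simp [List.getD, h]

theorem pvGetD_nil_eq (l : List (List Int)) (t : Nat) (h : t < l.length) :
    l.getD t [] = l[t] := List.getD_eq_getElem l [] h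

theorem pvRowLen (cells : List (List Int))
    (hlen : ∀ row ∈ cells, cells.length ≤ row.length)
    (t : Nat) (ht : t < cells.length) :
    cells.length ≤ (cells.getD t []).length := by
  rw [pvGetD_nil_eq cells t ht]
  exact hlen _ (List.getElem_mem ht)

theorem pvConsMapRange {α : Type} (g : Nat → α) (k : Nat) (x : α) (f : Nat → α)
    (hx : x = g 0) (hf : ∀ j, j < k → f j = g (j+1)) :
    x :: (List.range k).map f = (List.range (k+1)).map g := by
  rw [List.range_succ_eq_map, List.map_cons, List.map_map, hx]
  congr 1
  apply List.map_congr_left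
  intro j hj
  simpa using hf j (List.mem_range.mp hj)

-- A's accs strip difference equals pvRsum when everything is in range
theorem diffA_eq (cells : List (List Int)) (r i : Nat)
    (hr : r < cells.length) (hrow : i + 3 ≤ (cells.getD r []).length) :
    ((cells.map (fun line => line.scanl (· + ·) 0)).getD r []).getD (i+3) 0
      - ((cells.map (fun line => line.scanl (· + ·) 0)).getD r []).getD i 0
      = pvRsum cells r i := by
  rw [getD_map _ _ _ hr, scanl_getD _ _ _ hrow, scanl_getD _ _ _ (by omega)]
  simp [pvRsum]

theorem rowsA_eq (cells : List (List Int))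
    (hlen : ∀ row ∈ cells, cells.length ≤ row.length)
    (n : Nat) (hn : n + 2 = cells.length) :
    ∀ (k r0 : Nat), r0 + 1 + k ≤ n →
    pvRowsA (cells.map (fun line => line.scanl (· + ·) 0)) n
        ((List.range n).map (fun i => pvBval cells r0 i)) (r0+1) k
      = (List.range k).map (fun j => (List.range n).map (fun i => pvBval cells (r0+1+j) i)) := by
  intro k
  induction k with
  | zero => intro r0 _; simp [pvRowsA]
  | succ k ih =>
    intro r0 hk
    have hrowlen : ∀ t, t < cells.length → cells.length ≤ (cells.getD t []).length :=
      pvRowLen cells hlen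
    simp only [pvRowsA]
    have hnr : ((List.range n).map (fun i =>
        (((List.range n).map (fun i => pvBval cells r0 i)).getD i 0)
          - (((cells.map (fun line => line.scanl (· + ·) 0)).getD (r0+1-1) []).getD (i+3) 0
             - ((cells.map (fun line => line.scanl (· + ·) 0)).getD (r0+1-1) []).getD i 0)
          + (((cells.map (fun line => line.scanl (· + ·) 0)).getD (r0+1+2) []).getD (i+3) 0
             - ((cells.map (fun line => line.scanl (· + ·) 0)).getD (r0+1+2) []).getD i 0)))
        = (List.range n).map (fun i => pvBval cells (r0+1) i) := by
      apply List.map_congr_left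
      intro i hi
      have hi' : i < n := List.mem_range.mp hi
      have h1 : r0 + 1 - 1 = r0 := by omega
      rw [h1, getD_map_range' _ _ _ _ hi',
        diffA_eq cells r0 i (by omega) (by have := hrowlen r0 (by omega); omega),
        diffA_eq cells (r0+3) i (by omega) (by have := hrowlen (r0+3) (by omega); omega)]
      simp only [pvBval]
      have e1 : r0 + 1 + 1 = r0 + 2 := by omega
      have e2 : r0 + 1 + 2 = r0 + 3 := by omega
      rw [e1, e2]; ring
    rw [hnr, ih (r0+1) (by omega)]
    apply pvConsMapRange
    · rfl
    · intro j _
      have : r0 + 1 + (j + 1) = r0 + 1 + 1 + j := by omega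
      rw [this]

-- B-side: closed form for one summed-area row builder
theorem satRowGo_eq (prev : List Int) :
    ∀ (row : List Int) (c : Nat) (cur : Int),
    pvSatRowGo prev row c cur
      = (List.range row.length).map (fun j =>
          cur - prev.getD c 0 + prev.getD (c+1+j) 0 + (row.take (j+1)).sum) := by
  intro row
  induction row with
  | nil => intro c cur; simp [pvSatRowGo]
  | cons x xs ih =>
    intro c cur
    simp only [pvSatRowGo, List.length_cons]
    rw [ih (c+1) (x + prev.getD (c+1) 0 + cur - prev.getD c 0)]
    rw [List.range_succ_eq_map]
    simp only [List.map_cons, List.map_map]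
    congr 1
    · simp; ring
    · apply List.map_congr_left
      intro j _
      simp only [Function.comp, List.take_succ_cons, List.sum_cons]
      have : c + 1 + 1 + j = c + 1 + (j + 1) := by omega
      rw [this]; ring

theorem satRow_eq (cells : List (List Int)) (r : Nat) (prev : List Int)
    (hrow : cells.length ≤ (cells.getD r []).length)
    (hprev : prev = (List.range (cells.length + 1)).map (fun c => pvPsum cells r c)) :
    pvSatRow prev ((cells.getD r []).take cells.length)
      = (List.range (cells.length + 1)).map (fun c => pvPsum cells (r+1) c) := by
  have hlen : ((cells.getD r []).take cells.length).length = cells.length := by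
    rw [List.length_take]; omega
  simp only [pvSatRow, satRowGo_eq, hlen]
  apply pvConsMapRange
  · simp [pvPsum_zero, pvPsum]
  · intro j hj'
    simp only [hprev]
    rw [getD_map_range' _ _ _ _ (by omega : (0:Nat) < cells.length + 1),
      getD_map_range' _ _ _ _ (by omega : 0 + 1 + j < cells.length + 1)]
    simp only [pvPsum_zero, pvPsum]
    have : 0 + 1 + j = j + 1 := by omega
    rw [this]; ring

theorem satGo_eq (cells : List (List Int))
    (hlen : ∀ row ∈ cells, cells.length ≤ row.length) :
    ∀ (k r : Nat), r + k ≤ cells.length →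
    pvSatGo cells ((List.range (cells.length + 1)).map (fun c => pvPsum cells r c)) r cells.length k
      = (List.range k).map (fun j => (List.range (cells.length + 1)).map (fun c => pvPsum cells (r+1+j) c)) := by
  intro k
  induction k with
  | zero => intro r _; simp [pvSatGo]
  | succ k ih =>
    intro r hk
    have hrow : cells.length ≤ (cells.getD r []).length :=
      pvRowLen cells hlen r (by omega)
    simp only [pvSatGo]
    rw [satRow_eq cells r _ hrow rfl, ih (r+1) (by omega)]
    apply pvConsMapRange
    · rfl
    · intro j _
      have : r + 1 + (j + 1) = r + 1 + 1 + j := by omega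
      rw [this]

-- the full table P of port B, row by row
theorem P_eq (cells : List (List Int))
    (hlen : ∀ row ∈ cells, cells.length ≤ row.length) :
    List.replicate (cells.length+1) (0 : Int)
        :: pvSatGo cells (List.replicate (cells.length+1) (0 : Int)) 0 cells.length cells.length
      = (List.range (cells.length + 1)).map
          (fun t => (List.range (cells.length + 1)).map (fun c => pvPsum cells t c)) := by
  have h0 : List.replicate (cells.length+1) (0 : Int)
      = (List.range (cells.length + 1)).map (fun c => pvPsum cells 0 c) := by
    simp [pvPsum, List.map_const']
  rw [h0, satGo_eq cells hlen cells.length 0 (by omega)]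
  apply pvConsMapRange
  · rfl
  · intro j _
    have : j + 1 = 0 + 1 + j := by omega
    rw [this]

-- a corner difference of pvPsum is the 3x3 block sum
theorem psum_corners (cells : List (List Int))
    (r c : Nat) (hr : r + 3 ≤ cells.length) (hc : c + 3 ≤ cells.length) :
    pvPsum cells (r+3) (c+3) - pvPsum cells r (c+3) - pvPsum cells (r+3) c + pvPsum cells r c
      = pvBval cells r c := by
  have htake : ∀ (t m : Nat), t < cells.length → m ≤ cells.length →
      ((cells.getD t []).take cells.length).take m = (cells.getD t []).take m := by
    intro t m ht hm
    rw [List.take_take]; congr 1; omega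
  simp only [pvPsum]
  rw [htake r (c+3) (by omega) hc, htake r c (by omega) (by omega),
    htake (r+1) (c+3) (by omega) hc, htake (r+1) c (by omega) (by omega),
    htake (r+2) (c+3) (by omega) hc, htake (r+2) c (by omega) (by omega)]
  simp only [pvBval, pvRsum]
  ring

theorem largest_square_spec_aux (cells : List (List Int))
    (h3 : 3 ≤ cells.length)
    (hlen : ∀ row ∈ cells, cells.length ≤ row.length) :
    largest_square cells = largest_square_alt cells := by
  set C := cells.length with hC
  set n := C - 3 + 1 with hn
  have hn2 : n + 2 = C := by omega
  have hrow : ∀ t, t < C → C ≤ (cells.getD t []).length := by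
    intro t ht
    exact pvRowLen cells hlen t (by omega)
  -- common value of the two squares matrices
  have hM : ∀ (sq : List (List Int)),
      sq = (List.range n).map (fun r => (List.range n).map (fun i => pvBval cells r i)) →
      pvScanMax sq = pvScanMax ((List.range n).map (fun r => (List.range n).map (fun i => pvBval cells r i))) := by
    intro sq h; rw [h]
  -- A side
  have hA : largest_square cells
      = pvScanMax ((List.range n).map (fun r => (List.range n).map (fun i => pvBval cells r i))) := by
    show pvScanMax _ = _
    have hrow0 : (List.range n).map (fun i =>
        (((cells.map (fun line => line.scanl (· + ·) 0)).getD 0 []).getD (i+3) 0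
          - ((cells.map (fun line => line.scanl (· + ·) 0)).getD 0 []).getD i 0)
        + (((cells.map (fun line => line.scanl (· + ·) 0)).getD 1 []).getD (i+3) 0
          - ((cells.map (fun line => line.scanl (· + ·) 0)).getD 1 []).getD i 0)
        + (((cells.map (fun line => line.scanl (· + ·) 0)).getD 2 []).getD (i+3) 0
          - ((cells.map (fun line => line.scanl (· + ·) 0)).getD 2 []).getD i 0))
        = (List.range n).map (fun i => pvBval cells 0 i) := by
      apply List.map_congr_left
      intro i hi
      have hi' : i < n := List.mem_range.mp hi
      rw [diffA_eq cells 0 i (by omega) (by have := hrow 0 (by omega); omega),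
        diffA_eq cells 1 i (by omega) (by have := hrow 1 (by omega); omega),
        diffA_eq cells 2 i (by omega) (by have := hrow 2 (by omega); omega)]
      simp [pvBval]
    rw [hrow0]
    have := rowsA_eq cells hlen n hn2 (n-1) 0 (by omega)
    rw [this]
    congr 1
    rw [show n = (n - 1) + 1 by omega]
    apply pvConsMapRange
    · norm_num
    · intro j _
      have : 0 + 1 + j = j + 1 := by omega
      rw [this]
  -- B side
  have hB : largest_square_alt cells
      = pvScanMax ((List.range n).map (fun r => (List.range n).map (fun i => pvBval cells r i))) := by
    show pvScanMax _ = _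
    congr 1
    apply List.map_congr_left
    intro r hr
    apply List.map_congr_left
    intro c hc
    have hr' : r < n := List.mem_range.mp hr
    have hc' : c < n := List.mem_range.mp hc
    rw [P_eq cells hlen]
    rw [getD_map_range' _ _ _ _ (by omega : r + 3 < C + 1),
      getD_map_range' _ _ _ _ (by omega : r < C + 1)]
    rw [getD_map_range' _ _ _ _ (by omega : c + 3 < C + 1),
      getD_map_range' _ _ _ _ (by omega : c + 3 < C + 1),
      getD_map_range' _ _ _ _ (by omega : c < C + 1),
      getD_map_range' _ _ _ _ (by omega : c < C + 1)]
    exact psum_corners cells r c (by omega) (by omega)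
  rw [hA, hB]

-- ===== VERDICT (by name: the statement is the Claim_ definition above) =====
theorem largest_square_spec : Claim_equal_largest_square := by
  intro cells _ hpre
  unfold Spec_largest_square
  exact largest_square_spec_aux cells hpre.1 hpre.2
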